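-- pv_equiv track=rewrite | github.com/epsilon-less-than-0/autofolder | splitting.py | find_group_boundaries
-- ===== SOURCE A (Python) =====
-- def find_group_boundaries(tuple_list, real_tuples):
--     if not tuple_list:
--         return []
--
--     def is_real(t):
--         return t in real_tuples
--
--     # Find the first transition
--     first_type = is_real(tuple_list[0])
--     first_transition = next((i for i, t in enumerate(tuple_list) if is_real(t) != first_type), None)
--
--     if first_transition is None:
--         return []  # All tuples are of the same type
--
--     # Check if the list starts with 'infinitesimal' (non-real)
--     starts_with_infinitesimal = not first_type
--
--     # Find the second transition
--     second_transition = next((i for i in range(first_transition + 1, len(tuple_list)) if is_real(tuple_list[i]) == first_type), None)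
--
--     if second_transition is None:
--         # Only one transition, return it
--         return [first_transition]
--     else:
--         # Two transitions, return both
--         return [first_transition, second_transition]
-- ===== SOURCE B (Python) =====
-- def find_group_boundaries(tuple_list, real_tuples):
--     boundaries = []
--     prev = None
--     for i, t in enumerate(tuple_list):
--         cur = t in real_tuples
--         if prev is not None and cur != prev:
--             boundaries.append(i)
--             if len(boundaries) == 2:
--                 break
--         prev = cur
--     return boundaries
-- ===== Notes on version B (the rewrite author's own statement) =====
-- stated objective: simpler
-- what changed: Replaces A's two phased searches (first index whose is_real differs from the head's type, then a second indexed range-scan back to the head's type) with one forward pass comparing each element's is_real to the previous element's and collecting up to two transition indices.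
import Mathlib
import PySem

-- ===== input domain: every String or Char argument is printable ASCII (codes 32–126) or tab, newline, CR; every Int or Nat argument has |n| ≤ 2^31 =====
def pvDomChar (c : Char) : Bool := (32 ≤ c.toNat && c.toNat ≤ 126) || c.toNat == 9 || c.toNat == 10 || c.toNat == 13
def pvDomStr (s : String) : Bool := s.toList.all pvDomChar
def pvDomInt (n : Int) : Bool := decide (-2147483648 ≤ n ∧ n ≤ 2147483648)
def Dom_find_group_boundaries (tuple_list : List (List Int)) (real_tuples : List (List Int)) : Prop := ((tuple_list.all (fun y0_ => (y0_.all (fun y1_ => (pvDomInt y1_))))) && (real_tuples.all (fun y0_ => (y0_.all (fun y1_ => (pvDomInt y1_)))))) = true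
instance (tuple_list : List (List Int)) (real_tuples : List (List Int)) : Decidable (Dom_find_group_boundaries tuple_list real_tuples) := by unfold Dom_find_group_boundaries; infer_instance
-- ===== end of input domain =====

-- B replaces A's two phased reference-typed searches with one neighbour-comparison pass
-- collecting up to two transition indices (objective: simpler).

-- ===== PORT A =====
-- next((i for i, t in enumerate(xs) if p t), None): scan with a running index
def pvSearchIdx (p : List Int → Bool) : List (List Int) → Nat → Option Nat
  | [], _ => none
  | t :: r, i => if p t then some i else pvSearchIdx p r (i + 1)

-- next((i for i in range(start, len(tl)) if is_real(tl[i]) == ft), None): indexed while-loop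
def pvSecond (real_tuples : List (List Int)) (ft : Bool) (tl : List (List Int)) (i : Nat) : Option Nat :=
  if h : i < tl.length then
    if (real_tuples.contains tl[i]) == ft then some i else pvSecond real_tuples ft tl (i + 1)
  else none
termination_by tl.length - i

def find_group_boundaries (tuple_list : List (List Int)) (real_tuples : List (List Int)) : List Int :=
  match tuple_list with
  | [] => []
  | t0 :: _ =>
    let isReal := fun t => real_tuples.contains t
    let first_type := isReal t0
    match pvSearchIdx (fun t => isReal t != first_type) tuple_list 0 with
    | none => []
    | some j =>
      match pvSecond real_tuples first_type tuple_list (j + 1) with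
      | none => [(j : Int)]
      | some k => [(j : Int), (k : Int)]

-- ===== PORT B =====
def fgbLoop (real_tuples : List (List Int)) : List (List Int) → Nat → Option Bool → List Int → List Int
  | [], _, _, acc => acc
  | t :: r, i, prev, acc =>
    let cur := real_tuples.contains t
    match prev with
    | some p =>
      if cur != p then
        let acc' := acc ++ [(i : Int)]
        if acc'.length == 2 then acc'
        else fgbLoop real_tuples r (i + 1) (some cur) acc'
      else fgbLoop real_tuples r (i + 1) (some cur) acc
    | none => fgbLoop real_tuples r (i + 1) (some cur) acc

def find_group_boundaries_alt (tuple_list : List (List Int)) (real_tuples : List (List Int)) : List Int :=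
  fgbLoop real_tuples tuple_list 0 none []

-- ===== PRECONDITION & SPEC =====
def Spec_find_group_boundaries (tuple_list : List (List Int)) (real_tuples : List (List Int)) (out : List Int) : Prop := out = find_group_boundaries_alt tuple_list real_tuples
instance (tuple_list : List (List Int)) (real_tuples : List (List Int)) (out : List Int) : Decidable (Spec_find_group_boundaries tuple_list real_tuples out) := by unfold Spec_find_group_boundaries; infer_instance

-- ===== CLAIM (what is proved, stated in full; the proofs are below) =====
def Claim_equal_find_group_boundaries : Prop := ∀ (tuple_list : List (List Int)) (real_tuples : List (List Int)), Dom_find_group_boundaries tuple_list real_tuples → Spec_find_group_boundaries tuple_list real_tuples (find_group_boundaries tuple_list real_tuples)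

-- ===== LEMMAS AND PROOFS =====
-- [] if o = none, [k] if o = some k
def pvOptL (o : Option Nat) : List Int :=
  match o with
  | none => []
  | some k => [(k : Int)]

-- the common shape both programs compute on the suffix after the head, given the head's type ft
def pvAspec (real_tuples : List (List Int)) (ft : Bool) : List (List Int) → Nat → List Int
  | [], _ => []
  | t :: r, i =>
    if real_tuples.contains t != ft then
      (i : Int) :: pvOptL (pvSearchIdx (fun u => real_tuples.contains u == ft) r (i + 1))
    else pvAspec real_tuples ft r (i + 1)

theorem pvSecond_eq_search (rt : List (List Int)) (ft : Bool) (tl : List (List Int)) :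
    ∀ i : Nat, pvSecond rt ft tl i = pvSearchIdx (fun u => rt.contains u == ft) (tl.drop i) i := by
  intro i
  induction hn : tl.length - i using Nat.strong_induction_on generalizing i with
  | _ n ih =>
    unfold pvSecond
    by_cases h : i < tl.length
    · rw [List.drop_eq_getElem_cons h, dif_pos h]
      simp only [pvSearchIdx]
      split_ifs with hq
      · rfl
      · exact ih (tl.length - (i + 1)) (by omega) (i + 1) rfl
    · rw [dif_neg h, List.drop_of_length_le (by omega : tl.length ≤ i)]
      rfl

theorem pvA_eq_spec (rt : List (List Int)) (ft : Bool) (tl : List (List Int)) :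
    ∀ (xs : List (List Int)) (i : Nat), tl.drop i = xs →
      (match pvSearchIdx (fun t => rt.contains t != ft) xs i with
       | none => ([] : List Int)
       | some j =>
         match pvSecond rt ft tl (j + 1) with
         | none => [(j : Int)]
         | some k => [(j : Int), (k : Int)]) = pvAspec rt ft xs i := by
  intro xs
  induction xs with
  | nil => intro i _; simp [pvSearchIdx, pvAspec]
  | cons t r ih =>
    intro i hdrop
    have hr : tl.drop (i + 1) = r := by
      have := congrArg List.tail hdrop
      simpa using this
    simp only [pvSearchIdx, pvAspec]
    by_cases hp : (rt.contains t != ft) = true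
    · rw [if_pos hp, if_pos hp]
      show (match pvSecond rt ft tl (i + 1) with
            | none => [(i : Int)]
            | some k => [(i : Int), (k : Int)]) = _
      rw [pvSecond_eq_search, hr]
      cases pvSearchIdx (fun u => rt.contains u == ft) r (i + 1) <;> rfl
    · rw [if_neg hp, if_neg hp]
      exact ih (i + 1) hr

theorem fgbLoop_phase1 (rt : List (List Int)) (b : Bool) :
    ∀ (xs : List (List Int)) (i : Nat) (j : Int),
      fgbLoop rt xs i (some b) [j] =
        j :: pvOptL (pvSearchIdx (fun u => rt.contains u != b) xs i) := by
  intro xs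
  induction xs with
  | nil => intro i j; simp [fgbLoop, pvSearchIdx, pvOptL]
  | cons t r ih =>
    intro i j
    by_cases hc : rt.contains t = b
    · simp only [fgbLoop, pvSearchIdx, hc, bne_self_eq_false, Bool.false_eq_true, if_false]
      exact ih (i + 1) j
    · have hb : (rt.contains t != b) = true := bne_iff_ne.mpr hc
      simp only [fgbLoop, pvSearchIdx, hb, if_true, pvOptL]
      rfl

theorem fgbLoop_phase0 (rt : List (List Int)) (ft : Bool) :
    ∀ (xs : List (List Int)) (i : Nat),
      fgbLoop rt xs i (some ft) [] = pvAspec rt ft xs i := by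
  intro xs
  induction xs with
  | nil => intro i; simp [fgbLoop, pvAspec]
  | cons t r ih =>
    intro i
    by_cases hc : rt.contains t = ft
    · simp only [fgbLoop, pvAspec, hc, bne_self_eq_false, Bool.false_eq_true, if_false]
      exact ih (i + 1)
    · have hcur : rt.contains t = !ft := by
        cases h : rt.contains t <;> cases ft <;> simp_all
      have hb : (rt.contains t != ft) = true := bne_iff_ne.mpr hc
      have hpred : (fun u => rt.contains u != !ft) = (fun u => rt.contains u == ft) := by
        funext u
        cases h : rt.contains u <;> cases ft <;> simp
      simp only [fgbLoop, pvAspec, hcur, List.nil_append]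
      rw [show (([(i : Int)] : List Int).length == 2) = false from rfl]
      simp only [Bool.false_eq_true, if_false]
      rw [fgbLoop_phase1, hpred]
      have htt : ((!ft) != ft) = true := by cases ft <;> rfl
      simp [htt]

-- ===== VERDICT (by name: the statement is the Claim_ definition above) =====
theorem find_group_boundaries_spec : Claim_equal_find_group_boundaries := by
  unfold Claim_equal_find_group_boundaries
  intro tl rt _
  unfold Spec_find_group_boundaries find_group_boundaries find_group_boundaries_alt
  cases tl with
  | nil => simp [fgbLoop]
  | cons t0 rest =>
    simp only
    rw [pvA_eq_spec rt (rt.contains t0) (t0 :: rest) (t0 :: rest) 0 rfl]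
    simp only [fgbLoop]
    rw [fgbLoop_phase0]
    simp [pvAspec]
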